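-- pv_equiv track=rewrite | github.com/LukeH025/CodeSignal | 34_extractEachKth.py | solution
-- ===== SOURCE A (Python) =====
-- def solution(inputArray, k):
--     array=[]
--     i=0
--     tam=len(inputArray)-1
--     while True:
--         if (i+1)%3!=0:
--             array.append(inputArray[i])
--         i+=1
--         if tam<i:
--             break
--     return array
-- ===== SOURCE B (Python) =====
-- def solution(inputArray, k):
--     # Idiomatic: copy, then delete every third element with an extended slice.
--     arr = list(inputArray)
--     del arr[2::3]
--     return arr
-- ===== Notes on version B (the rewrite author's own statement) =====
-- stated objective: idiomatic
-- what changed: Replaces A's manual while-loop with counter, modulus test and per-element append by a single extended-slice deletion del arr[2::3] on a copy of the input.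
-- outside the precondition, e.g. on solution([], 3): A raises IndexError, B returns []
import Mathlib
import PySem

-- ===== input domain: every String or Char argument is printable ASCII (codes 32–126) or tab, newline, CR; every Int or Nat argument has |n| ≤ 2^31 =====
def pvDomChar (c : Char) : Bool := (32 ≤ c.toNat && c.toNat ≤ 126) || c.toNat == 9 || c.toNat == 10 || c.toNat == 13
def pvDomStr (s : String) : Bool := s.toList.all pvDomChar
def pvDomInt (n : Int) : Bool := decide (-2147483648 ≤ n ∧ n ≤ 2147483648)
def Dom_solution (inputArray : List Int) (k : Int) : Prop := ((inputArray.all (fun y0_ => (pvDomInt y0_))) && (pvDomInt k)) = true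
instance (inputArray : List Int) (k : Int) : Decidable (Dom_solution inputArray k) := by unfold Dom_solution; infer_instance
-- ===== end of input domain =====

-- B differs from A only in mechanism: one slice deletion instead of A's counter loop (objective: idiomatic).
-- A raises IndexError on the empty list (its loop body runs once before the bound check); Pre_ excludes it, B returns [].

-- ===== PORT A =====
-- A's `while True` loop; terminates because `tam < i` is eventually reached (tam = len-1 ≥ 0 under Pre_).
-- `inputArray[i]` is ported via pyGet?; `.getD 0` only fills the IndexError case, which Pre_ excludes.
def solutionGo (inputArray : List Int) (tam i : Int) (array : List Int) : List Int :=
  let array' := if (i + 1) % 3 ≠ 0 then array ++ [(PySem.List.pyGet? inputArray i).getD 0] else array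
  if _h : tam < i + 1 then array'
  else solutionGo inputArray tam (i + 1) array'
termination_by (tam + 1 - i).toNat
decreasing_by omega

def solution (inputArray : List Int) (k : Int) : List Int :=
  solutionGo inputArray ((inputArray.length : Int) - 1) 0 []

-- ===== PORT B =====
-- Source B's `del arr[2::3]` on a copy: extended-slice deletion keeps exactly the positions whose index is not ≡ 2 (mod 3).
def solution_alt (inputArray : List Int) (k : Int) : List Int :=
  (((PySem.List.enumerate inputArray).filter (fun p => p.1 % 3 != 2)).map (·.2))

-- ===== PRECONDITION & SPEC =====
-- A's do-while loop indexes inputArray[0] unconditionally, so it raises IndexError on the empty list.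
def Pre_solution (inputArray : List Int) (k : Int) : Prop := inputArray ≠ []
instance (inputArray : List Int) (k : Int) : Decidable (Pre_solution inputArray k) := by unfold Pre_solution; infer_instance

def pvWitness_solution : List Int × Int := ([1, 2, 3, 4], 3)

def Spec_solution (inputArray : List Int) (k : Int) (out : List Int) : Prop := out = solution_alt inputArray k
instance (inputArray : List Int) (k : Int) (out : List Int) : Decidable (Spec_solution inputArray k out) := by unfold Spec_solution; infer_instance

-- ===== CLAIM (what is proved, stated in full; the proofs are below) =====
def Claim_equal_solution : Prop := ∀ (inputArray : List Int) (k : Int), Dom_solution inputArray k → Pre_solution inputArray k → Spec_solution inputArray k (solution inputArray k)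

-- ===== LEMMAS AND PROOFS =====

-- Common characterisation: elements of xs at (global) indices i, i+1, … with (idx+1) % 3 ≠ 0.
def keepFrom (xs : List Int) (i : Int) : List Int :=
  match xs with
  | [] => []
  | x :: t => if (i + 1) % 3 ≠ 0 then x :: keepFrom t (i + 1) else keepFrom t (i + 1)

lemma alt_eq_keepFrom (xs : List Int) (s : Int) (hs : 0 ≤ s) :
    ((PySem.List.enumerate xs s).filter (fun p => p.1 % 3 != 2)).map (·.2) = keepFrom xs s := by
  induction xs generalizing s with
  | nil => simp [keepFrom, PySem.List.enumerate_nil]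
  | cons x t ih =>
    rw [PySem.List.enumerate_cons]
    have hmod : (s % 3 != 2) = decide ((s + 1) % 3 ≠ 0) := by
      apply Bool.eq_iff_iff.mpr
      simp only [bne_iff_ne, decide_eq_true_iff]
      omega
    simp only [List.filter_cons, keepFrom, hmod]
    by_cases h : (s + 1) % 3 ≠ 0 <;>
      simp [h, ih (s + 1) (by omega)]

lemma solutionGo_eq (n : Nat) :
    ∀ (xs : List Int) (i : Int) (acc : List Int), 0 ≤ i → i.toNat < xs.length →
      xs.length - i.toNat = n →
      solutionGo xs ((xs.length : Int) - 1) i acc = acc ++ keepFrom (xs.drop i.toNat) i := by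
  induction n with
  | zero => intro xs i acc h0 hlt hn; omega
  | succ m ih =>
    intro xs i acc h0 hlt hn
    rw [solutionGo]
    have hget : PySem.List.pyGet? xs i = some xs[i.toNat] := by
      rw [PySem.List.pyGet?_of_nonneg (h := h0), List.getElem?_eq_getElem hlt]
    have hdrop : xs.drop i.toNat = xs[i.toNat] :: xs.drop (i.toNat + 1) :=
      List.drop_eq_getElem_cons hlt
    by_cases hend : (xs.length : Int) - 1 < i + 1
    · -- last iteration: i.toNat = xs.length - 1
      have hdrop2 : xs.drop (i.toNat + 1) = [] := List.drop_eq_nil_of_le (by omega)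
      rw [dif_pos hend]
      rw [hdrop, hdrop2]
      by_cases hc : (i + 1) % 3 ≠ 0 <;> simp [hc, hget, keepFrom]
    · rw [dif_neg hend]
      have hrec := ih xs (i + 1) (if (i + 1) % 3 ≠ 0 then acc ++ [(PySem.List.pyGet? xs i).getD 0] else acc) (by omega) (by omega) (by omega)
      rw [hrec]
      have : (i + 1).toNat = i.toNat + 1 := by omega
      rw [this, hdrop]
      by_cases hc : (i + 1) % 3 ≠ 0 <;> simp [hc, hget, keepFrom]

-- ===== VERDICT (by name: the statement is the Claim_ definition above) =====
theorem solution_spec : Claim_equal_solution := by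
  intro xs k _ hpre
  unfold Spec_solution solution solution_alt
  rw [alt_eq_keepFrom xs 0 le_rfl]
  have hlen : 0 < xs.length := List.length_pos_iff.mpr hpre
  rw [solutionGo_eq xs.length xs 0 [] le_rfl (by simpa using hlen) (by simp)]
  simp
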